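-- pv_equiv track=rewrite | github.com/afzalsiddique/problem-solving | Problem_Solving_Python/leetcode/lc2013.py | do_test
-- ===== SOURCE A (Python) =====
-- import itertools; import math; import operator; import random; import string; from bisect import *; from collections import deque, defaultdict, Counter, OrderedDict; from functools import lru_cache, cache; from heapq import *; import unittest; from typing import List;
-- import itertools; import math; import operator; import random; import string; from bisect import *; from collections import deque, defaultdict, Counter, OrderedDict; from functools import lru_cache, cache; from heapq import *; import unittest; from typing import List;
--
-- def get_sol(): return DetectSquares()
--
-- class DetectSquares:
--     def __init__(self):
--         self.freq = Counter()
--     def add(self, point: List[int]) -> None: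
--         self.freq[(point[0], point[1])]+=1
--     def count(self, point: List[int]) -> int:
--         #    (x1,y1)                          (x4,y1) -> (x2,y2)
--         #
--         #
--         #    (x1,y4) -> (x3,y3)               (x4,y4)
--         freq = self.freq
--         res=0
--         x1,y1 = point
--         for x4,y4 in freq:
--             if (x1,y1)==(x4,y4): continue # area 0
--             if abs(x1-x4)!=abs(y1-y4): continue # diagonals are not equal. not square.
--             x2,y2 = x4,y1
--             x3,y3 = x1,y4
--             res += freq[x2,y2]*freq[x3,y3]*freq[x4,y4]
--         return res
--
-- def do_test(commands, inputs):
--     outputs = []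
--     obj = ""
--     for i,cmd,input in zip(range(len(inputs)),commands,inputs):
--         if cmd=='DetectSquares':
--             obj = get_sol()
--             outputs.append(None)
--         elif cmd=='add':
--             outputs.append(obj.add(input[0]))
--         elif cmd=='count':
--             outputs.append(obj.count(input[0]))
--     return outputs
-- ===== SOURCE B (Python) =====
-- def do_test(commands, inputs):
--     # B indexes added points by x-coordinate (x -> {y: multiplicity}) and drives the
--     # command stream with an explicit index/while loop; a count query walks only the
--     # query's own column and adds the two candidate squares' products per column point.
--     def count_sq(cols, x1, y1):
--         col = cols.get(x1)
--         if col is None: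
--             return 0
--         total = 0
--         for y4 in col:
--             d = y4 - y1
--             if d != 0:
--                 r = cols.get(x1 + d, {})
--                 l = cols.get(x1 - d, {})
--                 total += col[y4] * (r.get(y1, 0) * r.get(y4, 0)
--                                     + l.get(y1, 0) * l.get(y4, 0))
--         return total
--
--     n = min(len(commands), len(inputs))
--     outputs = []
--     cols = None
--     i = 0
--     while i < n:
--         cmd = commands[i]
--         if cmd == 'DetectSquares':
--             cols = {}
--             outputs.append(None)
--         elif cmd == 'add':
--             p = inputs[i][0]
--             col = cols.setdefault(p[0], {})
--             col[p[1]] = col.get(p[1], 0) + 1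
--             outputs.append(None)
--         elif cmd == 'count':
--             x1, y1 = inputs[i][0]
--             outputs.append(count_sq(cols, x1, y1))
--         i += 1
--     return outputs
-- ===== Notes on version B (the rewrite author's own statement) =====
-- stated objective: alternative
-- what changed: B replaces A's flat Counter over all distinct points (count scans every distinct point as a candidate diagonal) with an index of points grouped by x-coordinate driven by an index/while loop, so each count query walks only the query's own column and adds the two candidate squares' products per column point.
import Mathlib
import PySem

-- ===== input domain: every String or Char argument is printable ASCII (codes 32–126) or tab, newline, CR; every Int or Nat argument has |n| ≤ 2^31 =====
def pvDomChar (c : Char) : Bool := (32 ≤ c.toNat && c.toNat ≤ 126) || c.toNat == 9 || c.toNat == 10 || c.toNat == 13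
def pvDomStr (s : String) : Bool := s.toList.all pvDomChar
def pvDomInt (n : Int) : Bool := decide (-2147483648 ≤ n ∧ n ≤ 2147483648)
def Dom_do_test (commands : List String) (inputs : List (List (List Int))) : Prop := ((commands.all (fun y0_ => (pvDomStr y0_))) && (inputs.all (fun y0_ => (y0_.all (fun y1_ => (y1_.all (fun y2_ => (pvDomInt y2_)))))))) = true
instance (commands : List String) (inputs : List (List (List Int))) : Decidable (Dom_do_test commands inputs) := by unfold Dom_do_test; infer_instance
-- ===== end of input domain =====

-- B indexes the added points by x-coordinate and drives the command stream with an
-- index/while loop, so a count query walks only the query's own column.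

-- ===== PORT A =====
-- DetectSquares.count: loop 'for x4,y4 in freq'; Counter lookups default to 0.
def pvA_count (freq : PySem.Dict (Int × Int) Int) (x1 y1 : Int) : Int :=
  freq.keys.foldl (fun res k =>
    if (x1, y1) = k then res
    else if ¬ (|x1 - k.1| = |y1 - k.2|) then res
    else res + freq.getD (k.1, y1) 0 * freq.getD (x1, k.2) 0 * freq.getD (k.1, k.2) 0) 0

-- one iteration of do_test's loop; obj = "" before the first 'DetectSquares' is modeled
-- as 'none' (Python raises AttributeError on add/count there — outside Pre_).
def pvA_step (st : List (Option Int) × Option (PySem.Dict (Int × Int) Int))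
    (ci : String × List (List Int)) : List (Option Int) × Option (PySem.Dict (Int × Int) Int) :=
  if ci.1 = "DetectSquares" then
    (st.1 ++ [none], some PySem.Dict.empty)
  else if ci.1 = "add" then
    match st.2 with
    | some freq =>
        let point := (PySem.List.pyGet? ci.2 0).getD []
        let x := (PySem.List.pyGet? point 0).getD 0
        let y := (PySem.List.pyGet? point 1).getD 0
        (st.1 ++ [none], some (freq.insert (x, y) (freq.getD (x, y) 0 + 1)))
    | none => (st.1 ++ [none], none)   -- Python raises here; outside Pre_
  else if ci.1 = "count" then
    match st.2 with
    | some freq =>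
        let point := (PySem.List.pyGet? ci.2 0).getD []
        let x1 := (PySem.List.pyGet? point 0).getD 0
        let y1 := (PySem.List.pyGet? point 1).getD 0
        (st.1 ++ [some (pvA_count freq x1 y1)], some freq)
    | none => (st.1 ++ [some 0], none)   -- Python raises here; outside Pre_
  else st

def do_test (commands : List String) (inputs : List (List (List Int))) : List (Option Int) :=
  ((List.zip commands inputs).foldl pvA_step ([], none)).1

-- ===== PORT B =====
-- count_sq in Source B: 'col = cols.get(x1); if col is None: return 0', then walk the
-- column's y-values adding the two candidate squares' products per column point.
def pvB_cnt (cols : PySem.Dict Int (PySem.Dict Int Int)) (x1 y1 : Int) : Int :=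
  match cols.get? x1 with
  | none => 0
  | some col =>
      col.keys.foldl (fun total y4 =>
        let d := y4 - y1
        if d ≠ 0 then
          let r := cols.getD (x1 + d) PySem.Dict.empty
          let l := cols.getD (x1 - d) PySem.Dict.empty
          total + col.getD y4 0 * (r.getD y1 0 * r.getD y4 0 + l.getD y1 0 * l.getD y4 0)
        else total) 0

-- the while loop of Source B: structural recursion on the remaining iteration count
-- (fuel = n - i); 'cols = None' before the first 'DetectSquares' is the 'none' state
-- (Python raises AttributeError on add/count there — outside Pre_).
def pvB_run (fuel : Nat) (i : Nat) (commands : List String) (inputs : List (List (List Int)))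
    (cols : Option (PySem.Dict Int (PySem.Dict Int Int))) (outputs : List (Option Int)) :
    List (Option Int) :=
  match fuel with
  | 0 => outputs
  | fuel' + 1 =>
      let cmd := (PySem.List.pyGet? commands (i : Int)).getD ""
      if cmd = "DetectSquares" then
        pvB_run fuel' (i + 1) commands inputs (some PySem.Dict.empty) (outputs ++ [none])
      else if cmd = "add" then
        match cols with
        | some cs =>
            let p := (PySem.List.pyGet? ((PySem.List.pyGet? inputs (i : Int)).getD []) 0).getD []
            let p0 := (PySem.List.pyGet? p 0).getD 0
            let p1 := (PySem.List.pyGet? p 1).getD 0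
            let col := cs.getD p0 PySem.Dict.empty
            pvB_run fuel' (i + 1) commands inputs
              (some (cs.insert p0 (col.insert p1 (col.getD p1 0 + 1)))) (outputs ++ [none])
        | none => pvB_run fuel' (i + 1) commands inputs none (outputs ++ [none])   -- Python raises; outside Pre_
      else if cmd = "count" then
        match cols with
        | some cs =>
            let p := (PySem.List.pyGet? ((PySem.List.pyGet? inputs (i : Int)).getD []) 0).getD []
            let x1 := (PySem.List.pyGet? p 0).getD 0
            let y1 := (PySem.List.pyGet? p 1).getD 0
            pvB_run fuel' (i + 1) commands inputs (some cs) (outputs ++ [some (pvB_cnt cs x1 y1)])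
        | none => pvB_run fuel' (i + 1) commands inputs none (outputs ++ [some 0])   -- Python raises; outside Pre_
      else
        pvB_run fuel' (i + 1) commands inputs cols outputs

def do_test_alt (commands : List String) (inputs : List (List (List Int))) : List (Option Int) :=
  pvB_run (min commands.length inputs.length) 0 commands inputs none []

-- ===== PRECONDITION & SPEC =====
-- Pre_ excludes exactly the inputs where A raises: an 'add'/'count' before any
-- 'DetectSquares' (AttributeError on obj = ""), an 'add'/'count' with an empty argument
-- list (IndexError on input[0]), an 'add' whose point has fewer than 2 coordinates
-- (IndexError), and a 'count' whose point does not have exactly 2 coordinates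
-- (ValueError on 'x1,y1 = point').
def Pre_do_test (commands : List String) (inputs : List (List (List Int))) : Prop :=
  ∀ i ∈ List.range (min commands.length inputs.length),
    (commands.getD i "" = "add" →
       (∃ j ∈ List.range i, commands.getD j "" = "DetectSquares") ∧
       inputs.getD i [] ≠ [] ∧ 2 ≤ ((inputs.getD i []).getD 0 []).length) ∧
    (commands.getD i "" = "count" →
       (∃ j ∈ List.range i, commands.getD j "" = "DetectSquares") ∧
       inputs.getD i [] ≠ [] ∧ ((inputs.getD i []).getD 0 []).length = 2)
instance (commands : List String) (inputs : List (List (List Int))) : Decidable (Pre_do_test commands inputs) := by unfold Pre_do_test; infer_instance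

def pvWitness_do_test : List String × List (List (List Int)) :=
  (["DetectSquares", "add", "add", "add", "count"],
   [[], [[1, 1]], [[2, 2]], [[1, 2]], [[2, 1]]])

def Spec_do_test (commands : List String) (inputs : List (List (List Int))) (out : List (Option Int)) : Prop := out = do_test_alt commands inputs
instance (commands : List String) (inputs : List (List (List Int))) (out : List (Option Int)) : Decidable (Spec_do_test commands inputs out) := by unfold Spec_do_test; infer_instance

-- ===== CLAIM (what is proved, stated in full; the proofs are below) =====
def Claim_equal_do_test : Prop := ∀ (commands : List String) (inputs : List (List (List Int))), Dom_do_test commands inputs → Pre_do_test commands inputs → Spec_do_test commands inputs (do_test commands inputs)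

-- ===== LEMMAS AND PROOFS =====

-- proof-only reformulation of one iteration of B's while loop as a step over a pair
def pvB_step (st : List (Option Int) × Option (PySem.Dict Int (PySem.Dict Int Int)))
    (ci : String × List (List Int)) : List (Option Int) × Option (PySem.Dict Int (PySem.Dict Int Int)) :=
  if ci.1 = "DetectSquares" then
    (st.1 ++ [none], some PySem.Dict.empty)
  else if ci.1 = "add" then
    match st.2 with
    | some cs =>
        let p := (PySem.List.pyGet? ci.2 0).getD []
        let p0 := (PySem.List.pyGet? p 0).getD 0
        let p1 := (PySem.List.pyGet? p 1).getD 0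
        let col := cs.getD p0 PySem.Dict.empty
        (st.1 ++ [none], some (cs.insert p0 (col.insert p1 (col.getD p1 0 + 1))))
    | none => (st.1 ++ [none], none)
  else if ci.1 = "count" then
    match st.2 with
    | some cs =>
        let p := (PySem.List.pyGet? ci.2 0).getD []
        let x1 := (PySem.List.pyGet? p 0).getD 0
        let y1 := (PySem.List.pyGet? p 1).getD 0
        (st.1 ++ [some (pvB_cnt cs x1 y1)], some cs)
    | none => (st.1 ++ [some 0], none)
  else st

-- B's fueled index loop equals the fold of pvB_step over the rest of the zipped stream
lemma pvB_run_eq_fold (commands : List String) (inputs : List (List (List Int))) :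
    ∀ (fuel i : Nat) (cols : Option (PySem.Dict Int (PySem.Dict Int Int)))
      (outputs : List (Option Int)),
      i + fuel = min commands.length inputs.length →
      pvB_run fuel i commands inputs cols outputs =
        (((List.zip commands inputs).drop i).foldl pvB_step (outputs, cols)).1 := by
  intro fuel
  induction fuel with
  | zero =>
    intro i cols outputs h
    have : (List.zip commands inputs).drop i = [] := by
      apply List.drop_eq_nil_of_le
      simp [List.length_zip]; omega
    simp [pvB_run, this]
  | succ fuel' ih =>
    intro i cols outputs h
    have hic : i < commands.length := by omega
    have hii : i < inputs.length := by omega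
    have hiz : i < (List.zip commands inputs).length := by simp [List.length_zip]; omega
    have hdrop : (List.zip commands inputs).drop i =
        (List.zip commands inputs)[i] :: (List.zip commands inputs).drop (i + 1) :=
      List.drop_eq_getElem_cons hiz
    have hzel : (List.zip commands inputs)[i] = (commands[i], inputs[i]) := by
      simp [List.getElem_zip]
    have hgc : (PySem.List.pyGet? commands (i : Int)).getD "" = commands[i] := by
      simp [hic]
    have hgi : (PySem.List.pyGet? inputs (i : Int)).getD [] = inputs[i] := by
      simp [hii]
    rw [hdrop, hzel]
    show pvB_run (fuel' + 1) i commands inputs cols outputs = _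
    unfold pvB_run
    simp only [hgc, hgi, List.foldl_cons]
    by_cases hd : commands[i] = "DetectSquares"
    · simp only [pvB_step, hd]
      exact ih (i + 1) _ _ (by omega)
    · by_cases ha : commands[i] = "add"
      · have hne : ¬(("add" : String) = "DetectSquares") := by decide
        simp only [pvB_step, ha, if_neg hne]
        cases cols with
        | some cs => exact ih (i + 1) _ _ (by omega)
        | none => exact ih (i + 1) _ _ (by omega)
      · by_cases hc : commands[i] = "count"
        · have hne1 : ¬(("count" : String) = "DetectSquares") := by decide
          have hne2 : ¬(("count" : String) = "add") := by decide
          simp only [pvB_step, hc, if_neg hne1, if_neg hne2]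
          cases cols with
          | some cs => exact ih (i + 1) _ _ (by omega)
          | none => exact ih (i + 1) _ _ (by omega)
        · simp only [pvB_step, if_neg hd, if_neg ha, if_neg hc]
          exact ih (i + 1) _ _ (by omega)

-- simulation relation: B's x-indexed table represents the same point multiset as A's
-- flat Counter, and every key list is duplicate-free
def pvRel (freq : PySem.Dict (Int × Int) Int) (cols : PySem.Dict Int (PySem.Dict Int Int)) : Prop :=
  freq.keys.Nodup ∧
  (∀ x, (cols.getD x PySem.Dict.empty).keys.Nodup) ∧
  (∀ x y, freq.getD (x, y) 0 = (cols.getD x PySem.Dict.empty).getD y 0)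

-- lookup of the multiset's multiplicity, phrased on B's table
def pvG (cols : PySem.Dict Int (PySem.Dict Int Int)) (x y : Int) : Int :=
  (cols.getD x PySem.Dict.empty).getD y 0

-- the contribution of a candidate diagonal point p to A's count loop
def pvT (cols : PySem.Dict Int (PySem.Dict Int Int)) (x1 y1 : Int) (p : Int × Int) : Int :=
  if (x1, y1) = p then 0
  else if ¬ (|x1 - p.1| = |y1 - p.2|) then 0
  else pvG cols p.1 y1 * pvG cols x1 p.2 * pvG cols p.1 p.2

-- the contribution of a column point (x1, k) to B's count loop
def pvU (cols : PySem.Dict Int (PySem.Dict Int Int)) (x1 y1 k : Int) : Int :=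
  pvT cols x1 y1 (x1 + (k - y1), k) + pvT cols x1 y1 (x1 - (k - y1), k)

lemma pvRel_empty : pvRel PySem.Dict.empty PySem.Dict.empty := by
  refine ⟨?_, ?_, ?_⟩ <;> simp [PySem.Dict.getD_empty, PySem.Dict.keys_empty]

lemma pvRel_add (freq : PySem.Dict (Int × Int) Int) (cols : PySem.Dict Int (PySem.Dict Int Int))
    (h : pvRel freq cols) (x y : Int) :
    pvRel (freq.insert (x, y) (freq.getD (x, y) 0 + 1))
      (cols.insert x ((cols.getD x PySem.Dict.empty).insert y
        ((cols.getD x PySem.Dict.empty).getD y 0 + 1))) := by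
  obtain ⟨h1, h2, h3⟩ := h
  refine ⟨PySem.Dict.nodup_keys_insert _ _ _ h1, ?_, ?_⟩
  · intro a
    rw [PySem.Dict.getD_insert]
    split_ifs with hx
    · exact PySem.Dict.nodup_keys_insert _ _ _ (h2 x)
    · exact h2 a
  · intro a b
    by_cases hx : a = x
    · subst hx
      rw [PySem.Dict.getD_insert, PySem.Dict.getD_insert, if_pos rfl, PySem.Dict.getD_insert]
      by_cases hb : b = y
      · subst hb; rw [if_pos rfl, if_pos rfl, h3]
      · rw [if_neg (by simp [hb]), if_neg hb]; exact h3 a b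
    · rw [PySem.Dict.getD_insert, PySem.Dict.getD_insert, if_neg (by simp [hx]), if_neg hx]
      exact h3 a b

-- A's count loop is the sum of pvT over the distinct points
lemma pvA_count_sum (freq : PySem.Dict (Int × Int) Int) (cols : PySem.Dict Int (PySem.Dict Int Int))
    (h3 : ∀ x y, freq.getD (x, y) 0 = (cols.getD x PySem.Dict.empty).getD y 0) (x1 y1 : Int) :
    pvA_count freq x1 y1 = (freq.keys.map (pvT cols x1 y1)).sum := by
  unfold pvA_count
  refine Eq.trans (PySem.List.foldl_congr_mem _ _ (fun res k => res + pvT cols x1 y1 k) _ ?_) ?_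
  · intro acc k _
    simp only [pvT, pvG, ← h3]
    split_ifs <;> ring
  · rw [PySem.List.foldl_add]; ring

lemma pvT_plus (cols : PySem.Dict Int (PySem.Dict Int Int)) (x1 y1 k : Int) (hd : k - y1 ≠ 0) :
    pvT cols x1 y1 (x1 + (k - y1), k) =
      pvG cols (x1 + (k - y1)) y1 * pvG cols x1 k * pvG cols (x1 + (k - y1)) k := by
  have h1 : ¬ ((x1, y1) = ((x1 + (k - y1), k) : Int × Int)) := by
    simp only [Prod.mk.injEq, not_and]
    intro h _; omega
  have h2 : |x1 - (x1 + (k - y1))| = |y1 - k| := by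
    have e : x1 - (x1 + (k - y1)) = y1 - k := by ring
    rw [e]
  unfold pvT
  rw [if_neg h1, if_neg (not_not_intro h2)]

lemma pvT_minus (cols : PySem.Dict Int (PySem.Dict Int Int)) (x1 y1 k : Int) (hd : k - y1 ≠ 0) :
    pvT cols x1 y1 (x1 - (k - y1), k) =
      pvG cols (x1 - (k - y1)) y1 * pvG cols x1 k * pvG cols (x1 - (k - y1)) k := by
  have h1 : ¬ ((x1, y1) = ((x1 - (k - y1), k) : Int × Int)) := by
    simp only [Prod.mk.injEq, not_and]
    intro h _; omega
  have h2 : |x1 - (x1 - (k - y1))| = |y1 - k| := by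
    have e1 : x1 - (x1 - (k - y1)) = k - y1 := by ring
    have e2 : y1 - k = -(k - y1) := by ring
    rw [e1, e2, abs_neg]
  unfold pvT
  rw [if_neg h1, if_neg (not_not_intro h2)]

-- B's count loop is the sum of pvU over the column's distinct y-values
lemma pvB_cnt_sum (cols : PySem.Dict Int (PySem.Dict Int Int)) (x1 y1 : Int) :
    pvB_cnt cols x1 y1 = ((cols.getD x1 PySem.Dict.empty).keys.map (pvU cols x1 y1)).sum := by
  unfold pvB_cnt
  cases hg : cols.get? x1 with
  | none =>
      have : cols.getD x1 PySem.Dict.empty = PySem.Dict.empty := by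
        simp [PySem.Dict.getD, hg]
      simp [this, PySem.Dict.keys_empty]
  | some col =>
      have hcol : cols.getD x1 PySem.Dict.empty = col := by
        simp [PySem.Dict.getD, hg]
      rw [hcol]
      refine Eq.trans (PySem.List.foldl_congr_mem _ _ (fun total k => total + pvU cols x1 y1 k) _ ?_) ?_
      · intro acc k _
        by_cases hd : k - y1 = 0
        · have hk : k = y1 := by omega
          subst hk
          simp [pvU, pvT]
        · simp only [if_pos hd, pvU,
            pvT_plus cols x1 y1 k hd, pvT_minus cols x1 y1 k hd, pvG, hcol]
          ring
      · rw [PySem.List.foldl_add]; ring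

-- absent keys have multiplicity 0
lemma pvG_zero_of_not_mem (cols : PySem.Dict Int (PySem.Dict Int Int)) (x y : Int)
    (hm : y ∉ (cols.getD x PySem.Dict.empty).keys) : pvG cols x y = 0 := by
  unfold pvG
  refine PySem.Dict.getD_of_not_contains _ _ ?_
  by_contra hc
  exact hm ((PySem.Dict.contains_iff_mem_keys _ _).mp (by simpa using hc))

-- the heart of the equivalence: both count loops sum pvT over a superset of its support
lemma pv_count_eq (freq : PySem.Dict (Int × Int) Int) (cols : PySem.Dict Int (PySem.Dict Int Int))
    (h : pvRel freq cols) (x1 y1 : Int) :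
    pvA_count freq x1 y1 = pvB_cnt cols x1 y1 := by
  classical
  obtain ⟨h1, h2, h3⟩ := h
  set T := pvT cols x1 y1 with hT
  set G : Finset Int := (cols.getD x1 PySem.Dict.empty).keys.toFinset with hG
  set ep : Int → Int × Int := fun k => (x1 + (k - y1), k) with hep
  set em : Int → Int × Int := fun k => (x1 - (k - y1), k) with hem
  set K : Finset (Int × Int) := freq.keys.toFinset with hK
  set S : Finset (Int × Int) := G.image ep ∪ G.image em with hS
  -- pvT vanishes off S …
  have hTS : ∀ p : Int × Int, p ∉ S → T p = 0 := by
    intro p hp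
    by_cases hpe : (x1, y1) = p
    · simp [hT, pvT, hpe]
    · by_cases habs : |x1 - p.1| = |y1 - p.2|
      · have hyG : p.2 ∉ G := by
          intro hyG
          rcases abs_eq_abs.mp habs with hcase | hcase
          · exact hp (by
              apply Finset.mem_union_left
              exact Finset.mem_image.mpr ⟨p.2, hyG, by simp [hep, Prod.ext_iff]; omega⟩)
          · exact hp (by
              apply Finset.mem_union_right
              exact Finset.mem_image.mpr ⟨p.2, hyG, by simp [hem, Prod.ext_iff]; omega⟩)
        have : pvG cols x1 p.2 = 0 :=
          pvG_zero_of_not_mem cols x1 p.2 (by simpa [hG, List.mem_toFinset] using hyG)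
        simp [hT, pvT, hpe, habs, this]
      · simp [hT, pvT, hpe, habs]
  -- … and off K
  have hTK : ∀ p : Int × Int, p ∉ K → T p = 0 := by
    intro p hp
    have hfre : freq.getD (p.1, p.2) 0 = 0 := by
      refine PySem.Dict.getD_of_not_contains _ _ ?_
      by_contra hc
      exact hp (by
        simp only [hK, List.mem_toFinset]
        exact (PySem.Dict.contains_iff_mem_keys _ _).mp (by simpa using hc))
    have : pvG cols p.1 p.2 = 0 := by rw [pvG, ← h3, hfre]
    simp [hT, pvT, this]
  -- both sums extend to K ∪ S
  have hKS : ∑ p ∈ K, T p = ∑ p ∈ S, T p := by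
    rw [Finset.sum_subset (Finset.subset_union_left (s₂ := S)) (fun p _ hp => hTK p hp),
        Finset.sum_subset (Finset.subset_union_right (s₁ := K)) (fun p _ hp => hTS p hp)]
  -- the union of the two injective images, minus their trivial overlap
  have hinj_p : ∀ a ∈ G, ∀ b ∈ G, ep a = ep b → a = b := by
    intro a _ b _ hab; simpa [hep] using congrArg Prod.snd hab
  have hinj_m : ∀ a ∈ G, ∀ b ∈ G, em a = em b → a = b := by
    intro a _ b _ hab; simpa [hem] using congrArg Prod.snd hab
  have hoverlap : ∑ p ∈ G.image ep ∩ G.image em, T p = 0 := by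
    refine Finset.sum_eq_zero ?_
    intro p hp
    obtain ⟨hp1, hp2⟩ := Finset.mem_inter.mp hp
    obtain ⟨a, _, ha⟩ := Finset.mem_image.mp hp1
    obtain ⟨b, _, hb⟩ := Finset.mem_image.mp hp2
    have hpe : (x1, y1) = p := by
      rw [← ha] at hb ⊢
      simp only [hep, hem, Prod.mk.injEq] at hb ⊢
      omega
    simp [hT, pvT, hpe]
  calc pvA_count freq x1 y1
      = (freq.keys.map T).sum := pvA_count_sum freq cols h3 x1 y1
    _ = ∑ p ∈ K, T p := (List.sum_toFinset T h1).symm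
    _ = ∑ p ∈ S, T p := hKS
    _ = ∑ p ∈ G.image ep, T p + ∑ p ∈ G.image em, T p := by
          rw [hS, ← Finset.sum_union_inter, hoverlap, add_zero]
    _ = ∑ k ∈ G, T (ep k) + ∑ k ∈ G, T (em k) := by
          rw [Finset.sum_image hinj_p, Finset.sum_image hinj_m]
    _ = ∑ k ∈ G, pvU cols x1 y1 k := by
          rw [← Finset.sum_add_distrib]
          exact Finset.sum_congr rfl (fun k _ => by simp only [pvU, hT, hep, hem])
    _ = ((cols.getD x1 PySem.Dict.empty).keys.map (pvU cols x1 y1)).sum :=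
          List.sum_toFinset _ (h2 x1)
    _ = pvB_cnt cols x1 y1 := (pvB_cnt_sum cols x1 y1).symm

-- the two folds stay in lock-step: equal outputs, related states
lemma pv_fold_eq (l : List (String × List (List Int))) :
    ∀ (out : List (Option Int)) (oA : Option (PySem.Dict (Int × Int) Int))
      (oB : Option (PySem.Dict Int (PySem.Dict Int Int))),
      ((oA = none ∧ oB = none) ∨ (∃ f c, oA = some f ∧ oB = some c ∧ pvRel f c)) →
      (l.foldl pvA_step (out, oA)).1 = (l.foldl pvB_step (out, oB)).1 := by
  induction l with
  | nil => intro out oA oB _; rfl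
  | cons ci l ih =>
    intro out oA oB hrel
    simp only [List.foldl_cons]
    by_cases hd : ci.1 = "DetectSquares"
    · simp only [pvA_step, pvB_step, if_pos hd]
      exact ih _ _ _ (Or.inr ⟨_, _, rfl, rfl, pvRel_empty⟩)
    · by_cases ha : ci.1 = "add"
      · rcases hrel with ⟨hA, hB⟩ | ⟨f, c, hA, hB, hfc⟩
        · subst hA; subst hB
          simp only [pvA_step, pvB_step, if_neg hd, if_pos ha]
          exact ih _ _ _ (Or.inl ⟨rfl, rfl⟩)
        · subst hA; subst hB
          simp only [pvA_step, pvB_step, if_neg hd, if_pos ha]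
          exact ih _ _ _ (Or.inr ⟨_, _, rfl, rfl, pvRel_add f c hfc _ _⟩)
      · by_cases hc : ci.1 = "count"
        · rcases hrel with ⟨hA, hB⟩ | ⟨f, c, hA, hB, hfc⟩
          · subst hA; subst hB
            simp only [pvA_step, pvB_step, if_neg hd, if_neg ha, if_pos hc]
            exact ih _ _ _ (Or.inl ⟨rfl, rfl⟩)
          · subst hA; subst hB
            simp only [pvA_step, pvB_step, if_neg hd, if_neg ha, if_pos hc]
            rw [pv_count_eq f c hfc]
            exact ih _ _ _ (Or.inr ⟨_, _, rfl, rfl, hfc⟩)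
        · simp only [pvA_step, pvB_step, if_neg hd, if_neg ha, if_neg hc]
          exact ih _ _ _ hrel

theorem do_test_eq_alt (commands : List String) (inputs : List (List (List Int))) :
    do_test commands inputs = do_test_alt commands inputs := by
  unfold do_test do_test_alt
  rw [pvB_run_eq_fold commands inputs (min commands.length inputs.length) 0 none [] (by omega)]
  simp only [List.drop_zero]
  exact pv_fold_eq (List.zip commands inputs) [] none none (Or.inl ⟨rfl, rfl⟩)

-- ===== VERDICT (by name: the statement is the Claim_ definition above) =====
theorem do_test_spec : Claim_equal_do_test := by
  intro commands inputs _ _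
  unfold Spec_do_test
  exact do_test_eq_alt commands inputs
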